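-- pv_equiv track=rewrite | github.com/Madghostek/uni-projects | WSI22Z/wsi-lab4/ID3.py | split_data_and_classes
-- ===== SOURCE A (Python) =====
-- def split_data_and_classes(data, classes, feature, value):
--     '''
--     returns two new children subsets divided by feature at value,
--     feature is feature index (column number in dataset)
--     '''
--     classes_GE = [classes[idx] for idx, row in enumerate(
--         data) if row[feature] >= value]
--     classes_L = [classes[idx] for idx, row in enumerate(
--         data) if row[feature] < value]
--     data_GE = [data[idx] for idx, row in enumerate(
--         data) if row[feature] >= value]
--     data_L = [data[idx] for idx, row in enumerate(
--         data) if row[feature] < value]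
--     return (data_L, classes_L), (data_GE, classes_GE)
-- ===== SOURCE B (Python) =====
-- def split_data_and_classes(data, classes, feature, value):
--     data_L, classes_L, data_GE, classes_GE = [], [], [], []
--     for idx, row in enumerate(data):
--         if row[feature] >= value:
--             data_GE.append(row)
--             classes_GE.append(classes[idx])
--         elif row[feature] < value:
--             data_L.append(row)
--             classes_L.append(classes[idx])
--     return (data_L, classes_L), (data_GE, classes_GE)
-- ===== Notes on version B (the rewrite author's own statement) =====
-- stated objective: simpler
-- what changed: Replaces A's four separate filtering comprehensions (four passes over the data) with one pass over enumerate(data) that routes each row and its class into the L or GE accumulators.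
import Mathlib
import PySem

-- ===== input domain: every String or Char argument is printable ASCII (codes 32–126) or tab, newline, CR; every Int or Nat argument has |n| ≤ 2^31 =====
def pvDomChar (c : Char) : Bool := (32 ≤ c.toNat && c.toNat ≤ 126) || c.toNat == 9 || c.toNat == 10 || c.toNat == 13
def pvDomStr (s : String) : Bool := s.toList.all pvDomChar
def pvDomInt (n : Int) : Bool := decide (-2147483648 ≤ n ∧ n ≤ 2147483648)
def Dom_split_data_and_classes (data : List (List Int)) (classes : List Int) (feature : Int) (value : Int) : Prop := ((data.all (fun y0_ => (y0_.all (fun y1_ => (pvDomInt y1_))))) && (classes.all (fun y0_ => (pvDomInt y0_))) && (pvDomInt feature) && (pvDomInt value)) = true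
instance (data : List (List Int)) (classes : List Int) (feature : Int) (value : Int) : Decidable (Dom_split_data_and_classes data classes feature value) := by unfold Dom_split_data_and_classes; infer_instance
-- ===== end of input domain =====

-- B makes one pass over enumerate(data) instead of A's four filtering comprehensions; same return value.

-- ===== PORT A =====
-- Four comprehensions over enumerate(data); indexing via pyGetD (in range under Pre_).
def split_data_and_classes (data : List (List Int)) (classes : List Int) (feature : Int) (value : Int) : (List (List Int) × List Int) × (List (List Int) × List Int) :=
  let classes_GE := (PySem.List.enumerate data).foldl
    (fun acc p => if value ≤ PySem.List.pyGetD p.2 feature 0 then acc ++ [PySem.List.pyGetD classes p.1 0] else acc) []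
  let classes_L := (PySem.List.enumerate data).foldl
    (fun acc p => if PySem.List.pyGetD p.2 feature 0 < value then acc ++ [PySem.List.pyGetD classes p.1 0] else acc) []
  let data_GE := (PySem.List.enumerate data).foldl
    (fun acc p => if value ≤ PySem.List.pyGetD p.2 feature 0 then acc ++ [PySem.List.pyGetD data p.1 []] else acc) []
  let data_L := (PySem.List.enumerate data).foldl
    (fun acc p => if PySem.List.pyGetD p.2 feature 0 < value then acc ++ [PySem.List.pyGetD data p.1 []] else acc) []
  ((data_L, classes_L), (data_GE, classes_GE))

-- ===== PORT B =====
-- One fold over enumerate(data) maintaining the four accumulators (data_L, classes_L, data_GE, classes_GE).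
def split_data_and_classes_alt (data : List (List Int)) (classes : List Int) (feature : Int) (value : Int) : (List (List Int) × List Int) × (List (List Int) × List Int) :=
  let s := (PySem.List.enumerate data).foldl
    (fun s p =>
      if value ≤ PySem.List.pyGetD p.2 feature 0 then
        (s.1, s.2.1, s.2.2.1 ++ [p.2], s.2.2.2 ++ [PySem.List.pyGetD classes p.1 0])
      else if PySem.List.pyGetD p.2 feature 0 < value then
        (s.1 ++ [p.2], s.2.1 ++ [PySem.List.pyGetD classes p.1 0], s.2.2.1, s.2.2.2)
      else s)
    (([] : List (List Int)), ([] : List Int), ([] : List (List Int)), ([] : List Int))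
  ((s.1, s.2.1), (s.2.2.1, s.2.2.2))

-- ===== PRECONDITION & SPEC =====
-- Pre_ excludes exactly the inputs where Python A raises IndexError: a row where `feature` is
-- out of range, or fewer classes than data rows.
def Pre_split_data_and_classes (data : List (List Int)) (classes : List Int) (feature : Int) (value : Int) : Prop :=
  (∀ row ∈ data, PySem.Raise.InRange row.length feature) ∧ data.length ≤ classes.length
instance (data : List (List Int)) (classes : List Int) (feature : Int) (value : Int) : Decidable (Pre_split_data_and_classes data classes feature value) := by unfold Pre_split_data_and_classes; infer_instance
def pvWitness_split_data_and_classes : List (List Int) × List Int × Int × Int := ([[1], [3]], [0, 1], 0, 2)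

def Spec_split_data_and_classes (data : List (List Int)) (classes : List Int) (feature : Int) (value : Int) (out : (List (List Int) × List Int) × (List (List Int) × List Int)) : Prop := out = split_data_and_classes_alt data classes feature value
instance (data : List (List Int)) (classes : List Int) (feature : Int) (value : Int) (out : (List (List Int) × List Int) × (List (List Int) × List Int)) : Decidable (Spec_split_data_and_classes data classes feature value out) := by unfold Spec_split_data_and_classes; infer_instance

-- ===== CLAIM (what is proved, stated in full; the proofs are below) =====
def Claim_equal_split_data_and_classes : Prop := ∀ (data : List (List Int)) (classes : List Int) (feature : Int) (value : Int), Dom_split_data_and_classes data classes feature value → Pre_split_data_and_classes data classes feature value → Spec_split_data_and_classes data classes feature value (split_data_and_classes data classes feature value)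

-- ===== LEMMAS AND PROOFS =====

-- B's single fold computes the four independent folds of A, for any list of pairs.
theorem split_fold (feature value : Int) (classes : List Int) :
    ∀ (l : List (Int × List Int)) (dL : List (List Int)) (cL : List Int) (dGE : List (List Int)) (cGE : List Int),
    l.foldl
      (fun s p =>
        if value ≤ PySem.List.pyGetD p.2 feature 0 then
          (s.1, s.2.1, s.2.2.1 ++ [p.2], s.2.2.2 ++ [PySem.List.pyGetD classes p.1 0])
        else if PySem.List.pyGetD p.2 feature 0 < value then
          (s.1 ++ [p.2], s.2.1 ++ [PySem.List.pyGetD classes p.1 0], s.2.2.1, s.2.2.2)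
        else s)
      (dL, cL, dGE, cGE)
    = (l.foldl (fun acc p => if PySem.List.pyGetD p.2 feature 0 < value then acc ++ [p.2] else acc) dL,
       l.foldl (fun acc p => if PySem.List.pyGetD p.2 feature 0 < value then acc ++ [PySem.List.pyGetD classes p.1 0] else acc) cL,
       l.foldl (fun acc p => if value ≤ PySem.List.pyGetD p.2 feature 0 then acc ++ [p.2] else acc) dGE,
       l.foldl (fun acc p => if value ≤ PySem.List.pyGetD p.2 feature 0 then acc ++ [PySem.List.pyGetD classes p.1 0] else acc) cGE) := by
  intro l
  induction l with
  | nil => intro dL cL dGE cGE; simp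
  | cons p t ih =>
    intro dL cL dGE cGE
    by_cases h : value ≤ PySem.List.pyGetD p.2 feature 0
    · simp [List.foldl_cons, h, ih, not_lt.mpr h]
    · have h2 : PySem.List.pyGetD p.2 feature 0 < value := by omega
      simp [List.foldl_cons, h, h2, ih]

-- Over enumerate(data), data[idx] is the paired row itself.
theorem foldl_enum_self_ge (data : List (List Int)) (value feature : Int) (init : List (List Int)) :
    (PySem.List.enumerate data).foldl
      (fun acc p => if value ≤ PySem.List.pyGetD p.2 feature 0 then acc ++ [PySem.List.pyGetD data p.1 []] else acc) init
    = (PySem.List.enumerate data).foldl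
      (fun acc p => if value ≤ PySem.List.pyGetD p.2 feature 0 then acc ++ [p.2] else acc) init := by
  apply PySem.List.foldl_congr_mem
  intro acc p hp
  rw [PySem.List.mem_enumerate_iff] at hp
  obtain ⟨k, hk, rfl⟩ := hp
  simp [PySem.List.pyGetD_natCast, List.getD_eq_getElem?_getD, hk]

theorem foldl_enum_self_lt (data : List (List Int)) (value feature : Int) (init : List (List Int)) :
    (PySem.List.enumerate data).foldl
      (fun acc p => if PySem.List.pyGetD p.2 feature 0 < value then acc ++ [PySem.List.pyGetD data p.1 []] else acc) init
    = (PySem.List.enumerate data).foldl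
      (fun acc p => if PySem.List.pyGetD p.2 feature 0 < value then acc ++ [p.2] else acc) init := by
  apply PySem.List.foldl_congr_mem
  intro acc p hp
  rw [PySem.List.mem_enumerate_iff] at hp
  obtain ⟨k, hk, rfl⟩ := hp
  simp [PySem.List.pyGetD_natCast, List.getD_eq_getElem?_getD, hk]

-- ===== VERDICT (by name: the statement is the Claim_ definition above) =====
theorem split_data_and_classes_spec : Claim_equal_split_data_and_classes := by
  intro data classes feature value _ _
  simp only [Spec_split_data_and_classes, split_data_and_classes, split_data_and_classes_alt]
  rw [split_fold, foldl_enum_self_ge, foldl_enum_self_lt]
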